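-- pv_equiv track=rewrite | github.com/johnnycsv232/me-ops | ingest.py | detect_error_signature
-- ===== SOURCE A (Python) =====
-- def detect_error_signature(text: str | None) -> str | None:
--     """Extract error signature from text if present."""
--     if not text:
--         return None
--     error_keywords = [
--         "error", "failed", "failure", "exception", "troubleshoot",
--         "bug", "crash", "broken", "not found", "cannot", "unable",
--         "fatal", "critical", "timeout", "refused", "denied",
--     ]
--     text_lower = text.lower()
--     for kw in error_keywords:
--         if kw in text_lower:
--             # Return first sentence containing the keyword
--             for sentence in text.split("."):
--                 if kw in sentence.lower():
--                     trimmed = sentence.strip()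
--                     return trimmed[:200]  # type: ignore[index]
--     return None
-- ===== SOURCE B (Python) =====
-- def detect_error_signature(text: str | None) -> str | None:
--     """Extract error signature from text if present."""
--     if not text:
--         return None
--     error_keywords = [
--         "error", "failed", "failure", "exception", "troubleshoot",
--         "bug", "crash", "broken", "not found", "cannot", "unable",
--         "fatal", "critical", "timeout", "refused", "denied",
--     ]
--     best = len(error_keywords)          # sentinel: no keyword found yet
--     best_sentence = None
--     for sentence in text.split("."):
--         low = sentence.lower()
--         j = next((i for i, kw in enumerate(error_keywords) if kw in low), None)
--         if j is not None and j < best: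
--             best = j
--             best_sentence = sentence
--     if best_sentence is None:
--         return None
--     return best_sentence.strip()[:200]
-- ===== Notes on version B (the rewrite author's own statement) =====
-- stated objective: alternative
-- what changed: Inverted A's keyword-outer/sentence-inner double scan into a single pass over the sentences that tracks the lowest keyword index seen so far (with len(keywords) as sentinel) and its first sentence, then strips and slices the stored sentence once at the end.
import Mathlib
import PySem

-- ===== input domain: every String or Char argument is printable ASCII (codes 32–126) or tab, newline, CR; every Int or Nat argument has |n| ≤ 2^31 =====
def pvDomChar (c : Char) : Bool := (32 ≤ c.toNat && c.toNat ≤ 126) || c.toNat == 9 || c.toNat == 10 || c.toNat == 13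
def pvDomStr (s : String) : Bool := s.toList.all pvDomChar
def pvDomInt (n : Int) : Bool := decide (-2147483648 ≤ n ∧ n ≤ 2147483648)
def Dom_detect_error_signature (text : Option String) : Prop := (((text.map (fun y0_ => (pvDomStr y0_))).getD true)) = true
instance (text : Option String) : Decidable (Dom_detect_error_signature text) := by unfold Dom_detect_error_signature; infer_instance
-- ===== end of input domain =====

-- B replaces A's keyword-outer/sentence-inner double scan by a single pass over the
-- sentences that tracks the best (lowest) keyword index seen so far (alternative
-- decomposition, same cost).

-- ===== PORT A =====
-- the keyword list (module data, shared by both ports)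
def pvKeywords : List String :=
  ["error", "failed", "failure", "exception", "troubleshoot",
   "bug", "crash", "broken", "not found", "cannot", "unable",
   "fatal", "critical", "timeout", "refused", "denied"]

-- A's inner loop: first sentence whose lowercase contains kw, stripped and cut to 200
def pvInnerA (kw : String) : List String → Option String
  | [] => none
  | s :: rest =>
    if PySem.Str.isIn kw (PySem.Str.lower s) then
      some (PySem.Str.slice (PySem.Str.strip s) none (some 200))
    else pvInnerA kw rest

-- A's outer loop over the keywords (falls through to the next keyword if the inner
-- loop finds no sentence, exactly like Python's for/for/return)
def pvOuterA (tl : String) (sents : List String) : List String → Option String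
  | [] => none
  | kw :: rest =>
    if PySem.Str.isIn kw tl then
      match pvInnerA kw sents with
      | some r => some r
      | none => pvOuterA tl sents rest
    else pvOuterA tl sents rest

def detect_error_signature (text : Option String) : Option String :=
  match text with
  | none => none
  | some t =>
    if t = "" then none
    else
      -- text.split("."): the separator "." is non-empty, so split? is never none (getD [] unreachable)
      pvOuterA (PySem.Str.lower t) ((PySem.Str.split? t ".").getD []) pvKeywords

-- ===== PORT B =====
-- B's loop body: lowercase the sentence, find the first (= lowest) keyword index it
-- contains, and keep it only if it strictly beats the best seen so far
def pvStepB (acc : Nat × Option String) (s : String) : Nat × Option String :=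
  let low := PySem.Str.lower s
  match List.findIdx? (fun kw => PySem.Str.isIn kw low) pvKeywords with
  | some j => if j < acc.1 then (j, some s) else acc
  | none => acc

def detect_error_signature_alt (text : Option String) : Option String :=
  match text with
  | none => none
  | some t =>
    if t = "" then none
    else
      -- single pass; pvKeywords.length is the sentinel 'no keyword found yet'
      match (((PySem.Str.split? t ".").getD []).foldl pvStepB (pvKeywords.length, none)).2 with
      | none => none
      | some s => some (PySem.Str.slice (PySem.Str.strip s) none (some 200))

-- ===== PRECONDITION & SPEC =====
def Spec_detect_error_signature (text : Option String) (out : Option String) : Prop := out = detect_error_signature_alt text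
instance (text : Option String) (out : Option String) : Decidable (Spec_detect_error_signature text out) := by unfold Spec_detect_error_signature; infer_instance

-- ===== CLAIM (what is proved, stated in full; the proofs are below) =====
def Claim_equal_detect_error_signature : Prop := ∀ (text : Option String), Dom_detect_error_signature text → Spec_detect_error_signature text (detect_error_signature text)

-- ===== LEMMAS AND PROOFS =====

-- abbreviations used only by the proofs
def pvFinish (s : String) : String := PySem.Str.slice (PySem.Str.strip s) none (some 200)

def pvP (kw s : String) : Bool := PySem.Str.isIn kw (PySem.Str.lower s)

def pvIdx (s : String) : Nat :=
  (List.findIdx? (fun kw => pvP kw s) pvKeywords).getD pvKeywords.length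

theorem pv_go_mem (sep : List Char) :
    ∀ (fuel : Nat) (l cur : List Char) (acc : List (List Char)) (p : List Char),
      p ∈ PySem.Chars.splitOn.go sep fuel l cur acc → p ∈ acc ∨ p <:+: cur.reverse ++ l := by
  intro fuel
  induction fuel with
  | zero =>
    intro l cur acc p hp
    simp only [PySem.Chars.splitOn.go, List.mem_reverse, List.mem_cons] at hp
    rcases hp with h | h
    · exact Or.inr (h ▸ List.infix_rfl)
    · exact Or.inl h
  | succ fuel ih =>
    intro l cur acc p hp
    match l with
    | [] =>
      simp only [PySem.Chars.splitOn.go, List.mem_reverse, List.mem_cons] at hp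
      rcases hp with h | h
      · subst h; exact Or.inr ((List.prefix_append _ _).isInfix)
      · exact Or.inl h
    | c :: rest =>
      simp only [PySem.Chars.splitOn.go] at hp
      by_cases hpre : sep.isPrefixOf (c :: rest)
      · rw [if_pos hpre] at hp
        rcases ih _ _ _ _ hp with h | h
        · rcases List.mem_cons.mp h with h' | h'
          · exact Or.inr (h' ▸ (List.prefix_append _ _).isInfix)
          · exact Or.inl h'
        · refine Or.inr (h.trans ?_)
          simp only [List.reverse_nil, List.nil_append]
          exact ((List.drop_suffix _ _).trans (List.suffix_append _ _)).isInfix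
      · rw [if_neg hpre] at hp
        rcases ih _ _ _ _ hp with h | h
        · exact Or.inl h
        · refine Or.inr ?_
          simpa using h
theorem pv_sent_infix (t s : String) (hs : s ∈ (PySem.Str.split? t ".").getD []) :
    s.toList <:+: t.toList := by
  simp only [PySem.Str.split?, PySem.Chars.split?, List.isEmpty_iff] at hs
  have hs' : ∃ p ∈ PySem.Chars.splitOn t.toList ".".toList, String.ofList p = s := by
    simpa using hs
  rcases hs' with ⟨p, hp, rfl⟩
  rcases pv_go_mem _ _ _ _ _ _ hp with h | h
  · simp at h
  · simpa using h
theorem pv_cov (t kw s : String) (hs : s ∈ (PySem.Str.split? t ".").getD [])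
    (h : pvP kw s = true) : PySem.Str.isIn kw (PySem.Str.lower t) = true := by
  rw [pvP, PySem.Str.isIn_iff_infix] at h
  rw [PySem.Str.isIn_iff_infix]
  rw [PySem.Str.toList_lower, PySem.Chars.lower] at h ⊢
  exact h.trans ((pv_sent_infix t s hs).map _)
theorem pvInnerA_eq (kw : String) (sents : List String) :
    pvInnerA kw sents = (sents.find? (fun s => pvP kw s)).map pvFinish := by
  induction sents with
  | nil => rfl
  | cons s rest ih =>
    simp only [pvInnerA]
    split_ifs with h
    · rw [List.find?_cons_of_pos (show pvP kw s = true by simpa [pvP] using h)]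
      rfl
    · rw [List.find?_cons_of_neg (show ¬ pvP kw s = true by simpa [pvP] using h)]
      exact ih
theorem pvOuterA_char (tl : String) (sents : List String) :
    ∀ kws : List String,
      (∀ kw ∈ kws, (∃ s ∈ sents, pvP kw s = true) → PySem.Str.isIn kw tl = true) →
      pvOuterA tl sents kws =
        (kws.find? (fun kw => sents.any (fun s => pvP kw s))).bind
          (fun kw => (sents.find? (fun s => pvP kw s)).map pvFinish) := by
  intro kws
  induction kws with
  | nil => intro _; rfl
  | cons kw rest ih =>
    intro hcov
    have hrest := fun kw h => hcov kw (List.mem_cons_of_mem _ h)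
    simp only [pvOuterA, List.find?_cons]
    by_cases hany : sents.any (fun s => pvP kw s) = true
    · -- some sentence matches kw; then kw is in tl and the inner loop finds it
      have htl : PySem.Str.isIn kw tl = true := hcov kw (List.mem_cons_self) (by simpa using hany)
      rw [if_pos htl, pvInnerA_eq, hany]
      have hsome : (sents.find? (fun s => pvP kw s)).isSome = true := by
        rw [List.find?_isSome]; simpa using hany
      rcases Option.isSome_iff_exists.mp hsome with ⟨s0, hh⟩
      simp [hh]
    · -- no sentence matches kw: inner loop (if run) finds nothing; both skip kw
      have hnone : sents.find? (fun s => pvP kw s) = none := by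
        rw [List.find?_eq_none]
        intro x hx
        simp only [List.any_eq_true] at hany
        exact fun hc => hany ⟨x, hx, hc⟩
      rw [Bool.not_eq_true] at hany
      rw [hany]
      split_ifs with htl
      · rw [pvInnerA_eq, hnone]; simp [ih hrest]
      · exact ih hrest
theorem pvIdx_le (s : String) : pvIdx s ≤ pvKeywords.length := by
  unfold pvIdx
  cases h : List.findIdx? (fun kw => pvP kw s) pvKeywords with
  | none => simp
  | some j =>
    have := List.findIdx?_eq_some_iff_getElem.mp h
    rcases this with ⟨hlt, _⟩
    simpa using Nat.le_of_lt hlt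
theorem pvIdx_le_of_P (s : String) (j : Nat) (hj : j < pvKeywords.length)
    (h : pvP (pvKeywords[j]) s = true) : pvIdx s ≤ j := by
  unfold pvIdx
  cases hf : List.findIdx? (fun kw => pvP kw s) pvKeywords with
  | none =>
    rw [List.findIdx?_eq_none_iff] at hf
    have := hf (pvKeywords[j]) (List.getElem_mem hj)
    simp [h] at this
  | some k =>
    rcases List.findIdx?_eq_some_iff_getElem.mp hf with ⟨hlt, _, hmin⟩
    simp only [Option.getD_some]
    by_contra hc
    exact (hmin j (by omega)) (by simpa using h)
theorem pvIdx_lt_P (s : String) (h : pvIdx s < pvKeywords.length) :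
    pvP (pvKeywords[pvIdx s]'h) s = true := by
  cases hf : List.findIdx? (fun kw => pvP kw s) pvKeywords with
  | none =>
    exfalso
    have : pvIdx s = pvKeywords.length := by unfold pvIdx; rw [hf]; rfl
    omega
  | some k =>
    have hidx : pvIdx s = k := by unfold pvIdx; rw [hf]; rfl
    rcases List.findIdx?_eq_some_iff_getElem.mp hf with ⟨hlt, hp, _⟩
    subst hidx
    simpa using hp
theorem pvIdx_eq_len_iff (s : String) :
    pvIdx s = pvKeywords.length ↔ List.findIdx? (fun kw => pvP kw s) pvKeywords = none := by
  constructor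
  · intro h
    cases hf : List.findIdx? (fun kw => pvP kw s) pvKeywords with
    | none => rfl
    | some k =>
      rcases List.findIdx?_eq_some_iff_getElem.mp hf with ⟨hlt, _⟩
      unfold pvIdx at h; rw [hf] at h; simp at h; omega
  · intro h; unfold pvIdx; rw [h]; rfl
theorem pvStepB_eq (acc : Nat × Option String) (s : String) (h : acc.1 ≤ pvKeywords.length) :
    pvStepB acc s = if pvIdx s < acc.1 then (pvIdx s, some s) else acc := by
  unfold pvStepB
  cases hf : List.findIdx? (fun kw => pvP kw s) pvKeywords with
  | none =>
    have hidx : pvIdx s = pvKeywords.length := (pvIdx_eq_len_iff s).mpr hf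
    have hn : ¬ pvIdx s < acc.1 := by omega
    have hf' : List.findIdx? (fun kw => PySem.Str.isIn kw (PySem.Str.lower s)) pvKeywords = none := by
      simpa [pvP] using hf
    simp only [hf']
    rw [if_neg hn]
  | some j =>
    have hidx : pvIdx s = j := by unfold pvIdx; rw [hf]; rfl
    have hf' : List.findIdx? (fun kw => PySem.Str.isIn kw (PySem.Str.lower s)) pvKeywords = some j := by
      simpa [pvP] using hf
    simp only [hf']
    rw [hidx]
theorem pvRunMin_le_init : ∀ (sents : List String) (b : Nat),
    sents.foldl (fun m s => min m (pvIdx s)) b ≤ b := by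
  intro sents
  induction sents with
  | nil => intro b; simp
  | cons s rest ih =>
    intro b
    simp only [List.foldl_cons]
    exact le_trans (ih _) (min_le_left _ _)
theorem pvRunMin_le_mem : ∀ (sents : List String) (b : Nat) (s : String), s ∈ sents →
    sents.foldl (fun m s => min m (pvIdx s)) b ≤ pvIdx s := by
  intro sents
  induction sents with
  | nil => intro b s h; simp at h
  | cons x rest ih =>
    intro b s h
    simp only [List.foldl_cons]
    rcases List.mem_cons.mp h with rfl | h
    · exact le_trans (pvRunMin_le_init _ _) (min_le_right _ _)
    · exact ih _ s h
theorem pvRunMin_cases : ∀ (sents : List String) (b : Nat),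
    sents.foldl (fun m s => min m (pvIdx s)) b = b ∨
      ∃ s ∈ sents, sents.foldl (fun m s => min m (pvIdx s)) b = pvIdx s := by
  intro sents
  induction sents with
  | nil => intro b; exact Or.inl rfl
  | cons x rest ih =>
    intro b
    simp only [List.foldl_cons]
    rcases ih (min b (pvIdx x)) with h | ⟨s, hs, h⟩
    · rcases le_total b (pvIdx x) with hm | hm
      · exact Or.inl (h.trans (Nat.min_eq_left hm))
      · exact Or.inr ⟨x, List.mem_cons_self, h.trans (Nat.min_eq_right hm)⟩
    · exact Or.inr ⟨s, List.mem_cons_of_mem _ hs, h⟩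
theorem pv_find?_congr {α : Type} (l : List α) (p q : α → Bool)
    (h : ∀ a ∈ l, p a = q a) : l.find? p = l.find? q := by
  induction l with
  | nil => rfl
  | cons x rest ih =>
    have hx := h x List.mem_cons_self
    have hr := fun a ha => h a (List.mem_cons_of_mem _ ha)
    cases hq : q x with
    | true =>
      rw [List.find?_cons_of_pos (hx.trans hq), List.find?_cons_of_pos hq]
    | false =>
      rw [List.find?_cons_of_neg (by simp [hx, hq]), List.find?_cons_of_neg (by simp [hq])]
      exact ih hr
theorem pvFold_char : ∀ (sents : List String) (b : Nat) (o : Option String),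
    b ≤ pvKeywords.length →
    sents.foldl pvStepB (b, o) =
      (sents.foldl (fun m s => min m (pvIdx s)) b,
       if sents.foldl (fun m s => min m (pvIdx s)) b < b then
         sents.find? (fun s => decide (pvIdx s ≤ sents.foldl (fun m s => min m (pvIdx s)) b))
       else o) := by
  intro sents
  induction sents with
  | nil =>
    intro b o hb
    simp
  | cons s rest ih =>
    intro b o hb
    simp only [List.foldl_cons]
    rw [pvStepB_eq (b, o) s hb]
    by_cases hlt : pvIdx s < b
    · rw [if_pos hlt]
      have hb' : pvIdx s ≤ pvKeywords.length := pvIdx_le s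
      rw [ih (pvIdx s) (some s) hb']
      have hmin : min b (pvIdx s) = pvIdx s := Nat.min_eq_right (Nat.le_of_lt hlt)
      simp only [hmin]
      set M := rest.foldl (fun m s => min m (pvIdx s)) (pvIdx s) with hM
      have hMle : M ≤ pvIdx s := pvRunMin_le_init _ _
      have hMb : M < b := lt_of_le_of_lt hMle hlt
      rw [if_pos hMb]
      by_cases hMs : M < pvIdx s
      · rw [if_pos hMs]
        congr 1
        rw [List.find?_cons_of_neg (by simp; omega)]
      · rw [if_neg hMs]
        have hMeq : M = pvIdx s := le_antisymm hMle (Nat.le_of_not_lt hMs)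
        rw [List.find?_cons_of_pos (by simp [hMeq])]
    · rw [if_neg hlt]
      have hmin : min b (pvIdx s) = b := Nat.min_eq_left (Nat.le_of_not_lt hlt)
      simp only [hmin]
      rw [ih b o hb]
      set M := rest.foldl (fun m s => min m (pvIdx s)) b with hM
      by_cases hMb : M < b
      · rw [if_pos hMb, if_pos hMb]
        congr 1
        rw [List.find?_cons_of_neg (by simp; omega)]
      · rw [if_neg hMb, if_neg hMb]
-- the heart: for non-empty text the two ports agree
theorem pv_main (t : String) (ht : ¬ t = "") :
    detect_error_signature (some t) = detect_error_signature_alt (some t) := by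
  simp only [detect_error_signature, detect_error_signature_alt, if_neg ht]
  have hcov : ∀ kw ∈ pvKeywords,
      (∃ s ∈ (PySem.Str.split? t ".").getD [], pvP kw s = true) →
      PySem.Str.isIn kw (PySem.Str.lower t) = true := by
    rintro kw _ ⟨s, hs, hp⟩
    exact pv_cov t kw s hs hp
  rw [pvOuterA_char _ _ _ hcov, pvFold_char _ _ _ le_rfl]
  set sents := (PySem.Str.split? t ".").getD [] with hsents
  set M := sents.foldl (fun m s => min m (pvIdx s)) pvKeywords.length with hMdef
  have hML : M ≤ pvKeywords.length := pvRunMin_le_init _ _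
  have hMmem : ∀ s ∈ sents, M ≤ pvIdx s := fun s hs => pvRunMin_le_mem _ _ s hs
  by_cases hMlt : M < pvKeywords.length
  · -- some keyword occurs in some sentence; both sides pick keyword index M
    obtain ⟨s₀, hs₀m, hs₀⟩ : ∃ s ∈ sents, M = pvIdx s := by
      rcases pvRunMin_cases sents pvKeywords.length with h | h
      · rw [← hMdef] at h; omega
      · rw [← hMdef] at h; exact h
    have hs₀P : pvP (pvKeywords[M]'hMlt) s₀ = true := by
      have h' : pvIdx s₀ < pvKeywords.length := by omega
      have := pvIdx_lt_P s₀ h'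
      simp only [← hs₀] at this
      exact this
    have hlow : ∀ s ∈ sents, ∀ j : Nat, j < M → (hj : j < pvKeywords.length) →
        pvP (pvKeywords[j]) s = false := by
      intro s hs j hjM hj
      by_contra hc
      rw [Bool.not_eq_false] at hc
      have := pvIdx_le_of_P s j hj hc
      have := hMmem s hs
      omega
    have hfind : pvKeywords.find? (fun kw => sents.any (fun s => pvP kw s))
        = some (pvKeywords[M]'hMlt) := by
      apply List.find?_eq_some_iff_getElem.mpr
      refine ⟨by simp only [List.any_eq_true]; exact ⟨s₀, hs₀m, hs₀P⟩, M, hMlt, rfl, ?_⟩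
      intro j hj
      simp only [Bool.not_eq_true', List.any_eq_false]
      intro s hs
      simp [hlow s hs j hj (by omega)]
    rw [hfind, if_pos hMlt]
    simp only [Option.bind_some]
    have hcongr : sents.find? (fun s => decide (pvIdx s ≤ M))
        = sents.find? (fun s => pvP (pvKeywords[M]'hMlt) s) := by
      apply pv_find?_congr
      intro s hs
      cases hp : pvP (pvKeywords[M]'hMlt) s with
      | true =>
        have := pvIdx_le_of_P s M hMlt hp
        simp [this]
      | false =>
        simp only [decide_eq_false_iff_not, Nat.not_le]
        have hMs := hMmem s hs
        rcases Nat.lt_or_ge M (pvIdx s) with h | h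
        · exact h
        · exfalso
          have heq : pvIdx s = M := by omega
          have h' : pvIdx s < pvKeywords.length := by omega
          have := pvIdx_lt_P s h'
          simp only [heq] at this
          rw [hp] at this
          exact Bool.false_ne_true this
    rw [hcongr]
    cases sents.find? (fun s => pvP (pvKeywords[M]'hMlt) s) with
    | none => rfl
    | some s => rfl
  · -- no keyword occurs in any sentence; both sides return none
    have hM : M = pvKeywords.length := by omega
    have hnone : pvKeywords.find? (fun kw => sents.any (fun s => pvP kw s)) = none := by
      rw [List.find?_eq_none]
      intro kw hkw
      simp only [Bool.not_eq_true, List.any_eq_false]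
      intro s hs
      rcases List.mem_iff_getElem.mp hkw with ⟨j, hj, rfl⟩
      by_contra hc
      rw [Bool.not_eq_false] at hc
      have := pvIdx_le_of_P s j hj hc
      have := hMmem s hs
      have := pvIdx_le s
      omega
    rw [hnone, if_neg hMlt]
    rfl
-- ===== VERDICT (by name: the statement is the Claim_ definition above) =====
theorem detect_error_signature_spec : Claim_equal_detect_error_signature := by
  intro text _
  unfold Spec_detect_error_signature
  match text with
  | none => rfl
  | some t =>
    by_cases ht : t = ""
    · subst ht; rfl
    · exact pv_main t ht
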